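-- pv_equiv track=rewrite | github.com/IamWilliamWang/Leetcode-practice | 2020.8/虾皮2-魔法师的位置在M.py | getMinMagicalSteps
-- ===== SOURCE A (Python) =====
-- def getMinMagicalSteps(M: int, K: int):
--     count = 0
--     while M != K:
--         if M > K:
--             M -= 1  # -1卡
--             count += 1
--         elif abs(2 * M - K) < abs(M + 1 - K):
--             M *= 2  # *2卡
--             count += 1
--         else:
--             M += 1  # +1卡
--             count += 1
--     return count
-- ===== SOURCE B (Python) =====
-- def getMinMagicalSteps(M: int, K: int):
--     # A's greedy collapses into phases: for M >= K only decrements remain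
--     # (M - K steps); for M < 2 only increments are ever chosen (up to 2 or K);
--     # for 2 <= M < K the doubling test |2M-K| < |M+1-K| simplifies to
--     # 3*M <= 2*K - 2, and once it fails it stays false, so the tail is pure
--     # increments (or decrements after an overshoot): abs(M - K) steps.
--     if M >= K:
--         return M - K
--     if M < 2:
--         if K <= 2:
--             return K - M
--         count = 2 - M
--         M = 2
--     else:
--         count = 0
--     while 3 * M <= 2 * K - 2:
--         M *= 2
--         count += 1
--     return count + abs(M - K)
-- ===== Notes on version B (the rewrite author's own statement) =====
-- stated objective: faster
-- what changed: B replaces A's step-by-step simulation with a phase decomposition: the decrement phase and the small-M/tail increment phases become arithmetic (M-K, 2-M, abs(M-K)), and the only loop left is the doubling phase whose greedy test |2M-K|<|M+1-K| is simplified to the linear condition 3*M <= 2*K-2.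
import Mathlib
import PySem

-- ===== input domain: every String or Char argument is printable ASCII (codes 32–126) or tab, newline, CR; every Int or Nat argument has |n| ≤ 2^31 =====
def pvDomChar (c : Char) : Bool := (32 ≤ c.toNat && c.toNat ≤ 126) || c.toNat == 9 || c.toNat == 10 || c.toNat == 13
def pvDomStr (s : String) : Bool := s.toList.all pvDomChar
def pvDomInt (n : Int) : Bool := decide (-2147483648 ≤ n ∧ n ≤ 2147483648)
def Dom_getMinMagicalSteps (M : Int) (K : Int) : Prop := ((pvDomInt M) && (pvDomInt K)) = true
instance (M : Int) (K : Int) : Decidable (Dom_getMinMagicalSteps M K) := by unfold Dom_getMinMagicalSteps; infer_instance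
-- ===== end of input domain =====

-- B replaces A's step-by-step simulation by a phase decomposition: only the
-- doubling phase (test simplified to 3*M ≤ 2*K-2) remains a loop, everything
-- else is arithmetic — asymptotically faster when M-K is large.

-- ===== PORT A =====
-- A's while loop, step for step (Python's `abs x < abs y` on ints is exactly
-- `x.natAbs < y.natAbs`).  The loop is total because |M - K| strictly decreases
-- every iteration; `fuel = |M - K|` is exactly that measure: a totality guard
-- only, always sufficient at the entry call (the lemmas below are proved
-- whenever the fuel is sufficient).
def pvLoopA : Nat → Int → Int → Int → Int
  | 0, _, _, count => count
  | fuel + 1, M, K, count =>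
    if M = K then count
    else if M > K then pvLoopA fuel (M - 1) K (count + 1)
    else if (2 * M - K).natAbs < (M + 1 - K).natAbs then pvLoopA fuel (2 * M) K (count + 1)
    else pvLoopA fuel (M + 1) K (count + 1)
def getMinMagicalSteps (M : Int) (K : Int) : Int := pvLoopA (M - K).natAbs M K 0

-- ===== PORT B =====
-- Source B's doubling loop: `while 3*M <= 2*K-2: M *= 2; count += 1`, then the
-- arithmetic finish `count + abs(M-K)`.  Total because K - M strictly
-- decreases each iteration (M ≥ 2 at every entry); fuel = (K - M).natAbs is a
-- totality guard only, always sufficient at the entry calls.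
def pvDoubleB : Nat → Int → Int → Int → Int
  | 0, M, K, count => count + ((M - K).natAbs : Int)
  | fuel + 1, M, K, count =>
    if 3 * M ≤ 2 * K - 2 then pvDoubleB fuel (2 * M) K (count + 1)
    else count + ((M - K).natAbs : Int)
def getMinMagicalSteps_alt (M : Int) (K : Int) : Int :=
  if M ≥ K then M - K
  else if M < 2 then
    if K ≤ 2 then K - M
    else pvDoubleB (K - 2).natAbs 2 K (2 - M)
  else pvDoubleB (K - M).natAbs M K 0

-- ===== PRECONDITION & SPEC =====
def Spec_getMinMagicalSteps (M : Int) (K : Int) (out : Int) : Prop := out = getMinMagicalSteps_alt M K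
instance (M : Int) (K : Int) (out : Int) : Decidable (Spec_getMinMagicalSteps M K out) := by unfold Spec_getMinMagicalSteps; infer_instance

-- ===== CLAIM (what is proved, stated in full; the proofs are below) =====
def Claim_equal_getMinMagicalSteps : Prop := ∀ (M : Int) (K : Int), Dom_getMinMagicalSteps M K → Spec_getMinMagicalSteps M K (getMinMagicalSteps M K)

-- ===== LEMMAS AND PROOFS =====
-- A's decrement phase in closed form: once M ≥ K, the loop subtracts 1 until M = K.
theorem pvLoopA_ge (fuel : Nat) : ∀ (M K count : Int), K ≤ M → (M - K).natAbs ≤ fuel →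
    pvLoopA fuel M K count = count + (M - K) := by
  induction fuel with
  | zero => intro M K count h hf; simp only [pvLoopA]; omega
  | succ f ih =>
      intro M K count h hf
      simp only [pvLoopA]
      by_cases h0 : M = K
      · simp only [if_pos h0]; omega
      · simp only [if_neg h0, if_pos (by omega : M > K)]
        rw [ih (M - 1) K (count + 1) (by omega) (by omega)]
        omega

-- Main phase: for 2 ≤ M < K, A's branch test |2M-K| < |M+1-K| holds iff
-- 3M ≤ 2K-2, and A agrees with B's doubling loop.
theorem pvLoopA_eq_pvDoubleB (fuelB : Nat) : ∀ (fuelA : Nat) (M K count : Int),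
    2 ≤ M → M < K → (M - K).natAbs ≤ fuelA → (K - M).natAbs ≤ fuelB →
    pvLoopA fuelA M K count = pvDoubleB fuelB M K count := by
  induction fuelB with
  | zero => intro fuelA M K count h2 hMK hfa hfb; omega
  | succ fb ih =>
      intro fuelA M K count h2 hMK hfa hfb
      match fuelA with
      | 0 => omega
      | fa + 1 =>
        simp only [pvLoopA, pvDoubleB]
        simp only [if_neg (by omega : ¬ M = K), if_neg (by omega : ¬ M > K)]
        by_cases hd : 3 * M ≤ 2 * K - 2
        · -- doubling branch on both sides
          have habs : (2 * M - K).natAbs < (M + 1 - K).natAbs := by omega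
          simp only [if_pos habs, if_pos hd]
          by_cases hlt : 2 * M < K
          · exact ih fa (2 * M) K (count + 1) (by omega) hlt (by omega) (by omega)
          · -- overshoot (or exact hit): A only decrements from here; B's loop test
            -- 3*(2M) ≤ 2K-2 is now false at every remaining fuel.
            rw [pvLoopA_ge fa (2 * M) K (count + 1) (by omega) (by omega)]
            match fb with
            | 0 => simp only [pvDoubleB]; omega
            | fb' + 1 =>
              simp only [pvDoubleB, if_neg (by omega : ¬ 3 * (2 * M) ≤ 2 * K - 2)]
              omega
        · -- increment branch: A's test is false too, and stays false; A walks to K.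
          have habs : ¬ (2 * M - K).natAbs < (M + 1 - K).natAbs := by omega
          simp only [if_neg habs, if_neg hd]
          by_cases hK : M + 1 = K
          · rw [pvLoopA_ge fa (M + 1) K (count + 1) (by omega) (by omega)]; omega
          · rw [ih fa (M + 1) K (count + 1) (by omega) (by omega) (by omega) (by omega)]
            match fb with
            | 0 => omega
            | fb' + 1 =>
              simp only [pvDoubleB, if_neg (by omega : ¬ 3 * (M + 1) ≤ 2 * K - 2)]
              omega

-- Small-M phase: for M ≤ 1 and M < K, A only increments (up to 2, or up to K ≤ 2).
theorem pvLoopA_small (fuel : Nat) : ∀ (M K count : Int), M ≤ 1 → M < K → (M - K).natAbs ≤ fuel →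
    pvLoopA fuel M K count =
      (if K ≤ 2 then count + (K - M) else pvDoubleB (K - 2).natAbs 2 K (count + (2 - M))) := by
  induction fuel with
  | zero => intro M K count h1 hMK hf; omega
  | succ f ih =>
      intro M K count h1 hMK hf
      simp only [pvLoopA]
      have habs : ¬ (2 * M - K).natAbs < (M + 1 - K).natAbs := by omega
      simp only [if_neg (by omega : ¬ M = K), if_neg (by omega : ¬ M > K), if_neg habs]
      by_cases hK : M + 1 = K
      · rw [pvLoopA_ge f (M + 1) K (count + 1) (by omega) (by omega)]
        rw [if_pos (by omega : K ≤ 2)]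
        omega
      · by_cases h1' : M + 1 ≤ 1
        · rw [ih (M + 1) K (count + 1) h1' (by omega) (by omega)]
          by_cases hK2 : K ≤ 2
          · simp only [if_pos hK2]; omega
          · simp only [if_neg hK2]; ring_nf
        · -- M = 1, so M + 1 = 2 < K
          rw [pvLoopA_eq_pvDoubleB (K - 2).natAbs f (M + 1) K (count + 1)
                (by omega) (by omega) (by omega) (by omega)]
          rw [if_neg (by omega : ¬ K ≤ 2)]
          have hM : M + 1 = 2 := by omega
          rw [hM]
          congr 1
          omega

-- ===== VERDICT (by name: the statement is the Claim_ definition above) =====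
theorem getMinMagicalSteps_spec : Claim_equal_getMinMagicalSteps := by
  intro M K _
  unfold Spec_getMinMagicalSteps getMinMagicalSteps getMinMagicalSteps_alt
  by_cases hge : M ≥ K
  · rw [if_pos hge, pvLoopA_ge (M - K).natAbs M K 0 hge le_rfl]; omega
  · rw [if_neg hge]
    by_cases h2 : M < 2
    · rw [if_pos h2, pvLoopA_small (M - K).natAbs M K 0 (by omega) (by omega) le_rfl]
      by_cases hK2 : K ≤ 2
      · simp only [if_pos hK2]; omega
      · simp only [if_neg hK2]; congr 1; omega
    · rw [if_neg h2]
      exact pvLoopA_eq_pvDoubleB (K - M).natAbs (M - K).natAbs M K 0 (by omega) (by omega) le_rfl le_rfl
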